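-- pv_equiv track=rewrite | github.com/wolepp/jezyk-python-fais | lekcja_04/zad04.py | zad4_2_prostokat
-- ===== SOURCE A (Python) =====
-- def zad4_2_prostokat(x, y):
--     """
--     Zwraca prostokat o zadanych wymiarach.
--
--     >>> zad4_2_prostokat(3,2)
--     '+---+---+---+\\n|   |   |   |\\n+---+---+---+\\n|   |   |   |\\n+---+---+---+'
--     >>> zad4_2_prostokat(0,1)
--     '+\\n|\\n+'
--     >>> zad4_2_prostokat(0,0)
--     '+'
--     >>> zad4_2_prostokat(-2,3)
--     Traceback (most recent call last):
--         ...
--     ValueError: wymiar musi byc co najmniej rowny 0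
--     >>> zad4_2_prostokat(2,-3)
--     Traceback (most recent call last):
--         ...
--     ValueError: wymiar musi byc co najmniej rowny 0
--     >>> zad4_2_prostokat(2,'string')
--     Traceback (most recent call last):
--         ...
--     TypeError: wymiar musi byc liczba
--     """
--
--     try:
--         x = int(x)
--         y = int(y)
--     except ValueError:
--         raise TypeError('wymiar musi byc liczba')
--     if x < 0 or y < 0:
--         raise ValueError('wymiar musi byc co najmniej rowny 0')
--
--     prostokat = ''
--     for i in range(y):
--         prostokat += ('+---' * x) + '+\n'
--         prostokat += ('|   ' * x) + '|\n'
--     prostokat += ('+---' * x) + '+'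
--     return prostokat
-- ===== SOURCE B (Python) =====
-- def zad4_2_prostokat(x, y):
--     try:
--         x = int(x)
--         y = int(y)
--     except ValueError:
--         raise TypeError('wymiar musi byc liczba')
--     if x < 0 or y < 0:
--         raise ValueError('wymiar musi byc co najmniej rowny 0')
--
--     def znak(r, c):
--         # character of the figure at grid coordinates (row r, column c)
--         if c % 4:
--             return '-' if r % 2 == 0 else ' '
--         return '+' if r % 2 == 0 else '|'
--
--     return '\n'.join(
--         ''.join(znak(r, c) for c in range(4 * x + 1))
--         for r in range(2 * y + 1))
-- ===== Notes on version B (the rewrite author's own statement) =====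
-- stated objective: alternative
-- what changed: Instead of A's per-row accumulating loop that repeats template strings, B computes each character pointwise from its grid coordinates (row parity and column mod 4) and joins the generated rows once.
import Mathlib
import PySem

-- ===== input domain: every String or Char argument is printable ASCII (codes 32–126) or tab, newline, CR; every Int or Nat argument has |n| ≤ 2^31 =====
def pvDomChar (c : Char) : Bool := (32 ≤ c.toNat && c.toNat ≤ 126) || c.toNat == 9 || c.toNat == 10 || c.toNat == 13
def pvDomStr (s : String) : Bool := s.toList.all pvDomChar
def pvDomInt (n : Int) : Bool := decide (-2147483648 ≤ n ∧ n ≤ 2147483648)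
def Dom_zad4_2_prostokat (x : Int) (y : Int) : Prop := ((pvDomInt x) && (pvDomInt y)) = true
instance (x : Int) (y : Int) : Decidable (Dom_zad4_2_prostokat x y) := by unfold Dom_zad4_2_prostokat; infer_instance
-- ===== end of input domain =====

-- B computes each character pointwise from its grid coordinates (row parity, column mod 4)
-- and joins the generated rows once, instead of A's per-row accumulating template loop.

-- ===== PORT A =====
-- Python string repetition 's' * x (empty for x ≤ 0), over List Char
def pvRepA (x : Int) (s : List Char) : List Char := (List.replicate x.toNat s).flatten

def zad4_2_prostokat (x : Int) (y : Int) : String :=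
  -- int(x)/int(y) are identities on Int; the x<0/y<0 check raises, excluded by Pre_
  let prostokat : List Char :=
    (PySem.List.pyRange 0 y 1).foldl
      (fun acc _ =>
        (acc ++ (pvRepA x ['+','-','-','-'] ++ ['+','\n']))
             ++ (pvRepA x ['|',' ',' ',' '] ++ ['|','\n']))
      []
  String.mk (prostokat ++ (pvRepA x ['+','-','-','-'] ++ ['+']))

-- ===== PORT B =====
-- znak(r, c): the figure's character at row r, column c
def pvZnak (r : Int) (c : Int) : Char :=
  if PySem.Int.mod c 4 ≠ 0 then
    (if PySem.Int.mod r 2 = 0 then '-' else ' ')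
  else
    (if PySem.Int.mod r 2 = 0 then '+' else '|')

def zad4_2_prostokat_alt (x : Int) (y : Int) : String :=
  String.mk (List.intercalate ['\n']
    ((PySem.List.pyRange 0 (2*y+1) 1).map (fun r =>
      (PySem.List.pyRange 0 (4*x+1) 1).map (fun c => pvZnak r c))))

-- ===== PRECONDITION & SPEC =====
-- Pre_ excludes exactly the inputs where A raises ValueError (a negative dimension)
def Pre_zad4_2_prostokat (x : Int) (y : Int) : Prop := 0 ≤ x ∧ 0 ≤ y
instance (x : Int) (y : Int) : Decidable (Pre_zad4_2_prostokat x y) := by unfold Pre_zad4_2_prostokat; infer_instance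
def pvWitness_zad4_2_prostokat : Int × Int := (3, 2)

def Spec_zad4_2_prostokat (x : Int) (y : Int) (out : String) : Prop := out = zad4_2_prostokat_alt x y
instance (x : Int) (y : Int) (out : String) : Decidable (Spec_zad4_2_prostokat x y out) := by unfold Spec_zad4_2_prostokat; infer_instance

-- ===== CLAIM (what is proved, stated in full; the proofs are below) =====
def Claim_equal_zad4_2_prostokat : Prop := ∀ (x : Int) (y : Int), Dom_zad4_2_prostokat x y → Pre_zad4_2_prostokat x y → Spec_zad4_2_prostokat x y (zad4_2_prostokat x y)

-- ===== LEMMAS AND PROOFS =====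

-- the two per-parity characters pvZnak produces
def pvA (r : Int) : Char := if PySem.Int.mod r 2 = 0 then '+' else '|'
def pvB (r : Int) : Char := if PySem.Int.mod r 2 = 0 then '-' else ' '

theorem pvZnak_eq (r c : Int) :
    pvZnak r c = if PySem.Int.mod c 4 = 0 then pvA r else pvB r := by
  unfold pvZnak pvA pvB
  simp

-- one generated row is the corresponding repeated template
theorem pv_row (r : Int) (m : Nat) :
    (PySem.List.pyRange 0 (4*(m:Int)+1) 1).map (fun c => pvZnak r c)
      = (List.replicate m [pvA r, pvB r, pvB r, pvB r]).flatten ++ [pvA r] := by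
  induction m with
  | zero =>
      simp only [Nat.cast_zero, mul_zero, zero_add]
      simp [PySem.List.pyRange_one, pvZnak_eq, PySem.Int.mod]
  | succ k ih =>
      have h1 : (4*((k+1:Nat):Int)+1) = (4*(k:Int)+1) + 4 := by push_cast; ring
      rw [h1]
      have hsplit : PySem.List.pyRange 0 ((4*(k:Int)+1)+4) 1
          = PySem.List.pyRange 0 (4*(k:Int)+1) 1 ++ PySem.List.pyRange (4*(k:Int)+1) ((4*(k:Int)+1)+4) 1 :=
        PySem.List.pyRange_one_append 0 (4*(k:Int)+1) _ (by positivity) (by omega)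
      rw [hsplit, List.map_append, ih]
      rw [PySem.List.pyRange_one_cons (by omega), PySem.List.pyRange_one_cons (by omega),
          PySem.List.pyRange_one_cons (by omega), PySem.List.pyRange_one_cons (by omega),
          PySem.List.pyRange_one_eq_nil (by omega)]
      have e1 : pvZnak r (4*(k:Int)+1) = pvB r := by
        rw [pvZnak_eq]; rw [if_neg]; rw [PySem.Int.mod_eq_emod_of_pos (by omega)]; omega
      have e2 : pvZnak r (4*(k:Int)+1+1) = pvB r := by
        rw [pvZnak_eq]; rw [if_neg]; rw [PySem.Int.mod_eq_emod_of_pos (by omega)]; omega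
      have e3 : pvZnak r (4*(k:Int)+1+1+1) = pvB r := by
        rw [pvZnak_eq]; rw [if_neg]; rw [PySem.Int.mod_eq_emod_of_pos (by omega)]; omega
      have e4 : pvZnak r (4*(k:Int)+1+1+1+1) = pvA r := by
        rw [pvZnak_eq]; rw [if_pos]; rw [PySem.Int.mod_eq_emod_of_pos (by omega)]; omega
      simp [e1, e2, e3, e4, List.replicate_succ']

theorem pv_inter_step (s a b : List Char) (m : List (List Char)) :
    List.intercalate s (a :: b :: m) = a ++ s ++ List.intercalate s (b :: m) := by
  simp [List.intercalate, List.intersperse]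

theorem pv_inter_snoc2 (s u v : List Char) (a : List Char) (l : List (List Char)) :
    List.intercalate s ((a :: l) ++ [u, v])
      = List.intercalate s (a :: l) ++ s ++ u ++ s ++ v := by
  induction l generalizing a with
  | nil => simp [List.intercalate, List.intersperse, List.append_assoc]
  | cons b t ih =>
      have h : (a :: b :: t) ++ [u, v] = a :: b :: (t ++ [u, v]) := by simp
      rw [h]
      conv_lhs => rw [pv_inter_step]
      rw [show b :: (t ++ [u, v]) = (b :: t) ++ [u, v] from rfl, ih]
      conv_rhs => rw [pv_inter_step]
      simp [List.append_assoc]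

-- joining the alternating rows equals the flat repeated block followed by a border
theorem pv_join (Bd Cl : List Char) (n : Nat) :
    List.intercalate ['\n']
        ((PySem.List.pyRange 0 (2*(n:Int)+1) 1).map
          (fun r => if PySem.Int.mod r 2 = 0 then Bd else Cl))
      = (List.replicate n ((Bd ++ ['\n']) ++ (Cl ++ ['\n']))).flatten ++ Bd := by
  induction n with
  | zero =>
      simp [PySem.List.pyRange_one, PySem.Int.mod, List.intercalate]
  | succ k ih =>
      have h1 : (2*((k+1:Nat):Int)+1) = ((2*(k:Int)+1) + 1) + 1 := by push_cast; ring
      rw [h1, PySem.List.pyRange_one_succ_right (by omega),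
          PySem.List.pyRange_one_succ_right (by omega), List.append_assoc, List.map_append]
      have e1 : (if PySem.Int.mod (2*(k:Int)+1) 2 = 0 then Bd else Cl) = Cl := by
        rw [if_neg]; rw [PySem.Int.mod_eq_emod_of_pos (by omega)]; omega
      have e2 : (if PySem.Int.mod (2*(k:Int)+1+1) 2 = 0 then Bd else Cl) = Bd := by
        rw [if_pos]; rw [PySem.Int.mod_eq_emod_of_pos (by omega)]; omega
      have hm : ([(2*(k:Int)+1)] ++ [2*(k:Int)+1+1]).map
          (fun r => if PySem.Int.mod r 2 = 0 then Bd else Cl) = [Cl, Bd] := by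
        simp only [List.cons_append, List.nil_append, List.map_cons, List.map_nil]
        rw [e1, e2]
      rw [hm]
      have hne : (PySem.List.pyRange 0 (2*(k:Int)+1) 1).map
          (fun r => if PySem.Int.mod r 2 = 0 then Bd else Cl) ≠ [] := by
        simp [PySem.List.pyRange_one]
      obtain ⟨a, l, hal⟩ := List.exists_cons_of_ne_nil hne
      rw [hal, pv_inter_snoc2, ← hal, ih]
      simp [List.replicate_succ', List.append_assoc]

-- A's loop body appends a constant block, so the foldl is a flattened replicate
theorem pv_flatMap_const {α β : Type} (l : List α) (L : List β) :
    l.flatMap (fun _ => L) = (List.replicate l.length L).flatten := by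
  induction l with
  | nil => simp
  | cons a t ih => simp [List.flatMap_cons, ih, List.replicate_succ]

theorem zad4_2_prostokat_spec_aux (x y : Int) (hx : 0 ≤ x) (hy : 0 ≤ y) :
    zad4_2_prostokat x y = zad4_2_prostokat_alt x y := by
  obtain ⟨m, rfl⟩ : ∃ m : Nat, (m : Int) = x := ⟨x.toNat, Int.toNat_of_nonneg hx⟩
  obtain ⟨n, rfl⟩ : ∃ n : Nat, (n : Int) = y := ⟨y.toNat, Int.toNat_of_nonneg hy⟩
  -- A's side: the foldl is n repetitions of the constant two-row block
  unfold zad4_2_prostokat zad4_2_prostokat_alt pvRepA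
  simp only [Int.toNat_natCast]
  have hf :
      (PySem.List.pyRange 0 (n:Int) 1).foldl
        (fun acc (_ : Int) =>
          (acc ++ ((List.replicate m ['+','-','-','-']).flatten ++ ['+','\n']))
               ++ ((List.replicate m ['|',' ',' ',' ']).flatten ++ ['|','\n']))
        ([] : List Char)
      = (PySem.List.pyRange 0 (n:Int) 1).flatMap
          (fun _ =>
            ((List.replicate m ['+','-','-','-']).flatten ++ ['+','\n'])
              ++ ((List.replicate m ['|',' ',' ',' ']).flatten ++ ['|','\n'])) := by
    have := PySem.List.foldl_append_eq_flatMap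
      (g := fun (_ : Int) =>
            ((List.replicate m ['+','-','-','-']).flatten ++ ['+','\n'])
              ++ ((List.replicate m ['|',' ',' ',' ']).flatten ++ ['|','\n']))
      (l := PySem.List.pyRange 0 (n:Int) 1) (acc := ([] : List Char))
    simpa [List.append_assoc] using this
  rw [hf, pv_flatMap_const, PySem.List.length_pyRange_one, Int.sub_zero, Int.toNat_natCast]
  -- B's side: each generated row is a repeated template, rows alternate with parity
  have hrow : (fun r => (PySem.List.pyRange 0 (4*(m:Int)+1) 1).map (fun c => pvZnak r c))
      = (fun r => if PySem.Int.mod r 2 = 0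
          then (List.replicate m ['+','-','-','-']).flatten ++ ['+']
          else (List.replicate m ['|',' ',' ',' ']).flatten ++ ['|']) := by
    funext r
    rw [pv_row]
    unfold pvA pvB
    by_cases h : PySem.Int.mod r 2 = 0
    · rw [if_pos h, if_pos h, if_pos h]
    · rw [if_neg h, if_neg h, if_neg h]
  rw [hrow, pv_join]
  simp [List.append_assoc]

-- ===== VERDICT (by name: the statement is the Claim_ definition above) =====
theorem zad4_2_prostokat_spec : Claim_equal_zad4_2_prostokat := by
  intro x y _ hpre
  exact zad4_2_prostokat_spec_aux x y hpre.1 hpre.2
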